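-- pv_equiv track=rewrite | github.com/ernestlitvin/data-analytics-portfolio | main0916.py | symbols_spaces_count
-- ===== SOURCE A (Python) =====
-- def symbols_spaces_count(sentence):
--     symbols_count = 0
--     spaces_count = 0
--     for char in sentence:
--         if char == " ":
--             spaces_count += 1
--         else:
--             symbols_count += 1
--     return symbols_count, spaces_count
-- ===== SOURCE B (Python) =====
-- def symbols_spaces_count(sentence):
--     parts = sentence.split(" ")
--     return sum(map(len, parts)), len(parts) - 1
-- ===== Notes on version B (the rewrite author's own statement) =====
-- stated objective: faster
-- what changed: Replaces the per-character dual-accumulator Python loop with a split-on-space decomposition: the string is split at spaces, spaces = number of parts - 1 and symbols = total length of the parts.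
import Mathlib
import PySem

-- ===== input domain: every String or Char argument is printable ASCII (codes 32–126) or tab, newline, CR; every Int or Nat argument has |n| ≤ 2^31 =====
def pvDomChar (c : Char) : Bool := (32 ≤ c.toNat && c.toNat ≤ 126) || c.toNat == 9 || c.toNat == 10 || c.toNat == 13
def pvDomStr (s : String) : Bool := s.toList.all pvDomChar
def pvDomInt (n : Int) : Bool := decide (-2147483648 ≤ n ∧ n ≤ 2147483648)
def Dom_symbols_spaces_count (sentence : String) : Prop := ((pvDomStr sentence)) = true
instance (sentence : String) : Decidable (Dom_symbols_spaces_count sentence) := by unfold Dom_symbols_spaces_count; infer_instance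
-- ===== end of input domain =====

-- B splits the sentence on " " and derives both counts from the parts list (spaces = parts-1, symbols = total part length); objective: alternative decomposition.

-- ===== PORT A =====
def symbols_spaces_count (sentence : String) : Int × Int :=
  sentence.toList.foldl
    (fun (acc : Int × Int) char =>
      if char == ' ' then (acc.1, acc.2 + 1) else (acc.1 + 1, acc.2))
    (0, 0)

-- ===== PORT B =====
def symbols_spaces_count_alt (sentence : String) : Int × Int :=
  let parts : List (List Char) := PySem.Chars.splitOn sentence.toList [' ']  -- sentence.split(" "), sep ≠ ""
  (((parts.map List.length).sum : Int), (parts.length : Int) - 1)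

-- ===== PRECONDITION & SPEC =====
def Spec_symbols_spaces_count (sentence : String) (out : Int × Int) : Prop := out = symbols_spaces_count_alt sentence
instance (sentence : String) (out : Int × Int) : Decidable (Spec_symbols_spaces_count sentence out) := by unfold Spec_symbols_spaces_count; infer_instance

-- ===== CLAIM (what is proved, stated in full; the proofs are below) =====
def Claim_equal_symbols_spaces_count : Prop := ∀ (sentence : String), Dom_symbols_spaces_count sentence → Spec_symbols_spaces_count sentence (symbols_spaces_count sentence)

-- ===== LEMMAS AND PROOFS =====

theorem fold_char : ∀ (l : List Char) (a b : Int),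
    l.foldl (fun (acc : Int × Int) char =>
      if char == ' ' then (acc.1, acc.2 + 1) else (acc.1 + 1, acc.2)) (a, b)
      = (a + l.countP (fun c => ¬ c = ' '), b + (l.count ' ' : Int)) := by
  intro l
  induction l with
  | nil => intro a b; simp
  | cons c t ih =>
    intro a b
    rw [List.foldl_cons]
    by_cases h : (c == ' ') = true
    · rw [if_pos h, ih]
      simp only [beq_iff_eq] at h
      simp only [h, List.count_cons, List.countP_cons, Prod.mk.injEq]
      constructor <;> simp <;> push_cast <;> ring
    · rw [if_neg h, ih]
      simp only [beq_iff_eq] at h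
      simp only [List.count_cons, List.countP_cons, Prod.mk.injEq]
      constructor <;> simp [h] <;> push_cast <;> ring

theorem splitOn_go_space : ∀ (fuel : Nat) (l cur : List Char) (acc : List (List Char)),
    l.length < fuel →
    (PySem.Chars.splitOn.go [' '] fuel l cur acc).length = acc.length + 1 + l.count ' '
    ∧ ((PySem.Chars.splitOn.go [' '] fuel l cur acc).map List.length).sum
        = (acc.map List.length).sum + cur.length + l.countP (fun c => ¬ c = ' ') := by
  intro fuel
  induction fuel with
  | zero => intro l cur acc h; omega
  | succ f ih =>
    intro l cur acc h
    cases l with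
    | nil => simp [PySem.Chars.splitOn.go]
    | cons c rest =>
      by_cases hc : c = ' '
      · have hgo : PySem.Chars.splitOn.go [' '] (f + 1) (c :: rest) cur acc
            = PySem.Chars.splitOn.go [' '] f rest [] (cur.reverse :: acc) := by
          simp [PySem.Chars.splitOn.go, List.isPrefixOf, hc]
        have := ih rest [] (cur.reverse :: acc) (by simp at h; omega)
        rw [hgo]
        simp only [this.1, this.2, List.count_cons, List.countP_cons, List.map_cons,
          List.sum_cons, List.length_cons, List.length_reverse, List.length_nil, hc]
        constructor <;> simp <;> omega
      · have hgo : PySem.Chars.splitOn.go [' '] (f + 1) (c :: rest) cur acc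
            = PySem.Chars.splitOn.go [' '] f rest (c :: cur) acc := by
          simp [PySem.Chars.splitOn.go, List.isPrefixOf, hc]
          intro he; exact absurd he.symm hc
        have := ih rest (c :: cur) acc (by simp at h; omega)
        rw [hgo]
        simp only [this.1, this.2, List.count_cons, List.countP_cons, List.length_cons]
        constructor <;> simp [hc] <;> omega

-- ===== VERDICT (by name: the statement is the Claim_ definition above) =====
theorem symbols_spaces_count_spec : Claim_equal_symbols_spaces_count := by
  intro s _
  unfold Spec_symbols_spaces_count symbols_spaces_count symbols_spaces_count_alt
  rw [fold_char]
  have h := splitOn_go_space (s.toList.length + 1) s.toList [] [] (by omega)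
  rw [PySem.Chars.splitOn] at *
  simp only [h.1, h.2, List.length_nil, List.map_nil, List.sum_nil, Prod.mk.injEq]
  constructor <;> push_cast <;> omega
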